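-- pv_equiv track=rewrite | github.com/GuiFernandess7/leetcode-problem-solving | techniques/slidingWindow/main.py | maxSubstringSequence2
-- ===== SOURCE A (Python) =====
-- from typing import List
--
-- def maxSubstringSequence2(nums: List[int]):
--     charset = set()
--     longest_substring = 0
--     l = 0
--
--     for i in range(len(nums)):
--         while nums[i] in charset:
--             charset.remove(nums[i])
--             l += 1
--
--         charset.add(nums[i])
--         longest_substring = max(longest_substring, i - l + 1)
--     return longest_substring
-- ===== SOURCE B (Python) =====
-- from typing import List
--
-- def maxSubstringSequence2(nums: List[int]):
--     return len(set(nums))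
-- ===== Notes on version B (the rewrite author's own statement) =====
-- stated objective: simpler
-- what changed: A's remove-then-re-add window scan always keeps charset equal to the set of values seen so far, so its running max is just the distinct count; B returns len(set(nums)) directly with no loop, pointers or running max.
import Mathlib
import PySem

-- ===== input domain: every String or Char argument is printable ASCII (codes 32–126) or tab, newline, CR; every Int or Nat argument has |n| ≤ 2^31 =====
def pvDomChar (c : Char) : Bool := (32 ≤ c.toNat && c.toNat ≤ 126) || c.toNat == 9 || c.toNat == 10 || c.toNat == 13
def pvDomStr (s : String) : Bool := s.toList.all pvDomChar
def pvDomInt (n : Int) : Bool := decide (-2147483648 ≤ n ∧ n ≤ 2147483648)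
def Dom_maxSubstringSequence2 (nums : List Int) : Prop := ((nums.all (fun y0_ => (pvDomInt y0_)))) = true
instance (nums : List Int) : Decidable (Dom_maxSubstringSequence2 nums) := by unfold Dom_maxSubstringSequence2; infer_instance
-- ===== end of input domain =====

-- B replaces A's set-juggling window scan by the distinct count it actually computes: len(set(nums)) (simpler; no loop, no left pointer, no running max).

-- ===== PORT A =====
-- the 'while nums[i] in charset: charset.remove(nums[i]); l += 1' loop, step for step
-- (charset.remove is exact here: inside the while branch membership is guaranteed, so
--  Python's remove never raises; PySem.Set.discard removes the element exactly as remove does)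
def pyWhileRemove (x : Int) (s : PySem.Set Int) (l : Int) : PySem.Set Int × Int :=
  if h : PySem.Set.contains s x then pyWhileRemove x (PySem.Set.discard s x) (l + 1) else (s, l)
termination_by s.length
decreasing_by
  simp only [PySem.Set.discard]
  exact List.length_filter_lt_length_iff_exists.mpr
    ⟨x, (PySem.Set.contains_iff s x).mp h, by simp⟩

-- 'for i in range(len(nums)): … nums[i] …' as a fold over the (index, value) pairs
def maxSubstringSequence2 (nums : List Int) : Int :=
  ((PySem.List.enumerate nums).foldl
    (fun (st : PySem.Set Int × Int × Int) p =>
      (PySem.Set.add (pyWhileRemove p.2 st.1 st.2.2).1 p.2,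
       max st.2.1 (p.1 - (pyWhileRemove p.2 st.1 st.2.2).2 + 1),
       (pyWhileRemove p.2 st.1 st.2.2).2))
    (PySem.Set.empty, 0, 0)).2.1

-- ===== PORT B =====
def maxSubstringSequence2_alt (nums : List Int) : Int :=
  PySem.Set.len (PySem.Set.ofList nums)

-- ===== PRECONDITION & SPEC =====
def Spec_maxSubstringSequence2 (nums : List Int) (out : Int) : Prop := out = maxSubstringSequence2_alt nums
instance (nums : List Int) (out : Int) : Decidable (Spec_maxSubstringSequence2 nums out) := by unfold Spec_maxSubstringSequence2; infer_instance

-- ===== CLAIM (what is proved, stated in full; the proofs are below) =====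
def Claim_equal_maxSubstringSequence2 : Prop := ∀ (nums : List Int), Dom_maxSubstringSequence2 nums → Spec_maxSubstringSequence2 nums (maxSubstringSequence2 nums)

-- ===== LEMMAS AND PROOFS =====

theorem pyWhileRemove_of_not_mem (x : Int) (s : PySem.Set Int) (l : Int) (hx : x ∉ s) :
    pyWhileRemove x s l = (s, l) := by
  rw [pyWhileRemove, dif_neg (by simp [hx])]

theorem pyWhileRemove_of_mem (x : Int) (s : PySem.Set Int) (l : Int) (hx : x ∈ s) :
    pyWhileRemove x s l = (PySem.Set.discard s x, l + 1) := by
  rw [pyWhileRemove, dif_pos ((PySem.Set.contains_iff s x).mpr hx)]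
  exact pyWhileRemove_of_not_mem _ _ _ (by simp [PySem.Set.mem_discard])

theorem length_discard_of_mem (s : PySem.Set Int) (x : Int) (hn : s.Nodup) (hx : x ∈ s) :
    (PySem.Set.discard s x).length = s.length - 1 := by
  have h1 : PySem.Set.discard s x = s.erase x := by
    rw [List.Nodup.erase_eq_filter hn x]
    simp [PySem.Set.discard, bne]
  rw [h1, List.length_erase_of_mem hx]

theorem length_update_congr (xs : List Int) (s t : PySem.Set Int)
    (hs : s.Nodup) (ht : t.Nodup) (h : ∀ y, y ∈ s ↔ y ∈ t) :
    (PySem.Set.update s xs).length = (PySem.Set.update t xs).length := by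
  apply List.Perm.length_eq
  rw [List.perm_ext_iff_of_nodup (PySem.Set.nodup_update s xs hs) (PySem.Set.nodup_update t xs ht)]
  intro y
  simp [PySem.Set.mem_update, h y]

theorem loop_eq (xs : List Int) : ∀ (s : PySem.Set Int) (l : Int), s.Nodup →
    ((PySem.List.enumerate xs ((s.length : Int) + l)).foldl
      (fun (st : PySem.Set Int × Int × Int) p =>
        (PySem.Set.add (pyWhileRemove p.2 st.1 st.2.2).1 p.2,
         max st.2.1 (p.1 - (pyWhileRemove p.2 st.1 st.2.2).2 + 1),
         (pyWhileRemove p.2 st.1 st.2.2).2))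
      (s, (s.length : Int), l)).2.1
    = ((PySem.Set.update s xs).length : Int) := by
  induction xs with
  | nil => intro s l _; simp [PySem.List.enumerate_nil, PySem.Set.update_nil]
  | cons x xs ih =>
    intro s l hn
    rw [PySem.List.enumerate_cons, List.foldl_cons]
    by_cases hx : x ∈ s
    · -- duplicate: while fires once; set size is unchanged
      simp only [pyWhileRemove_of_mem x s l hx]
      have hxd : x ∉ PySem.Set.discard s x := by simp [PySem.Set.mem_discard]
      have hadd : PySem.Set.add (PySem.Set.discard s x) x = PySem.Set.discard s x ++ [x] :=
        PySem.Set.add_of_not_mem hxd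
      have hlen : (PySem.Set.add (PySem.Set.discard s x) x).length = s.length := by
        rw [hadd, List.length_append, length_discard_of_mem s x hn hx]
        have hpos : 0 < s.length := List.length_pos_of_mem hx
        simp only [List.length_cons, List.length_nil]
        omega
      have hmax : max ((s.length : Int)) ((s.length : Int) + l - (l + 1) + 1) = (s.length : Int) := by
        omega
      have hnod : (PySem.Set.add (PySem.Set.discard s x) x).Nodup :=
        PySem.Set.nodup_add _ x (PySem.Set.nodup_discard s x hn)
      have := ih (PySem.Set.add (PySem.Set.discard s x) x) (l + 1) hnod
      rw [hlen] at this
      simp only [hmax]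
      have harith : (s.length : Int) + l + 1 = (s.length : Int) + (l + 1) := by ring
      rw [harith, this]
      -- the rebuilt set has the same members as s, so later updates agree in size
      rw [PySem.Set.update_cons, PySem.Set.add_of_mem hx]
      congr 1
      apply length_update_congr _ _ _ hnod hn
      intro y
      simp only [PySem.Set.mem_add, PySem.Set.mem_discard]
      constructor
      · rintro (⟨hy, _⟩ | rfl) <;> assumption
      · intro hy; by_cases hyx : y = x
        · right; exact hyx
        · left; exact ⟨hy, hyx⟩
    · -- new value: while is skipped; set grows by one
      simp only [pyWhileRemove_of_not_mem x s l hx]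
      have hadd : PySem.Set.add s x = s ++ [x] := PySem.Set.add_of_not_mem hx
      have hlen : (PySem.Set.add s x).length = s.length + 1 := by
        rw [hadd, List.length_append]; simp
      have hmax : max ((s.length : Int)) ((s.length : Int) + l - l + 1) = ((s.length + 1 : Nat) : Int) := by
        push_cast; omega
      have hnod : (PySem.Set.add s x).Nodup := PySem.Set.nodup_add s x hn
      have := ih (PySem.Set.add s x) l hnod
      rw [hlen] at this
      simp only [hmax]
      have harith : (s.length : Int) + l + 1 = ((s.length + 1 : Nat) : Int) + l := by push_cast; ring
      rw [harith, this, PySem.Set.update_cons]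

-- ===== VERDICT (by name: the statement is the Claim_ definition above) =====
theorem maxSubstringSequence2_spec : Claim_equal_maxSubstringSequence2 := by
  intro nums _
  unfold Spec_maxSubstringSequence2 maxSubstringSequence2 maxSubstringSequence2_alt
  have := loop_eq nums PySem.Set.empty 0 (by simp [PySem.Set.empty])
  simp only [PySem.Set.empty, List.length_nil, Nat.cast_zero, add_zero] at this
  simp only [PySem.Set.empty]
  rw [this, PySem.Set.update_nil_left]
  simp [PySem.Set.len]
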